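-- pv_equiv track=rewrite | github.com/lhlssmile/leetcode-practice | lc_cpp/lcCpp/Z_competition/py_ver/test.py | solve_x_value
-- ===== SOURCE A (Python) =====
-- import collections
--
-- def solve_x_value(nums, k):
--     """
--     计算 nums 数组移除不重叠前后缀后，剩余子数组乘积模 k 的余数分布。
--
--     Args:
--         nums: 正整数组成的数组。
--         k: 正整数模数。
--
--     Returns:
--         一个大小为 k 的数组 result，result[x] 表示乘积模 k 余数为 x 的操作数量。
--     """
--     n = len(nums)
--     if n == 0:
--         return [0] * k
--
--     lurminexod = {'nums': list(nums), 'k': k}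
--
--     # 从 lurminexod 获取处理所需的数据 (虽然这里直接用输入的参数更自然)
--     nums_proc = lurminexod['nums']
--     k_proc = lurminexod['k']
--     n_proc = len(nums_proc)
--
--     # total_result[x] 存储所有子数组乘积 % k == x 的数量
--     total_result = [0] * k_proc
--
--     # current_dp[x] 存储以当前元素 nums[i] 结尾的子数组中，
--     # 乘积 % k == x 的数量。使用 defaultdict 可以简化代码。
--     current_dp = collections.defaultdict(int)
--
--     for i in range(n_proc):
--         num_mod_k = nums_proc[i] % k_proc
--
--         # next_dp 用于计算以 nums[i] 结尾的子数组的余数分布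
--         next_dp = collections.defaultdict(int)
--
--         # 1. 单独元素 nums[i] 构成的子数组
--         # 这个子数组以 nums[i] 结尾，其乘积模 k 的余数是 num_mod_k
--         next_dp[num_mod_k] += 1
--
--         # 2. 将 nums[i] 追加到以 nums[i-1] 结尾的子数组末尾
--         # 遍历上一轮的状态 current_dp (代表以 nums[i-1] 结尾的子数组)
--         for prev_rem, count in current_dp.items():
--             # prev_rem 是以 nums[i-1] 结尾的某个子数组的乘积 % k
--             # count 是这种子数组的数量
--             # 新的子数组以 nums[i] 结尾，其乘积 % k 为 (prev_rem * num_mod_k) % k_proc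
--             new_rem = (prev_rem * num_mod_k) % k_proc
--             next_dp[new_rem] += count
--
--         # 3. 将本轮计算出的、以 nums[i] 结尾的子数组的计数，累加到总结果中
--         for rem, count in next_dp.items():
--             total_result[rem] += count
--
--         # 4. 更新 current_dp 为 next_dp，为下一轮迭代做准备
--         current_dp = next_dp
--
--     return total_result
-- ===== SOURCE B (Python) =====
-- def solve_x_value(nums, k):
--     n = len(nums)
--     if n == 0:
--         return [0] * k
--     result = [0] * k
--     for i in range(n):
--         running = 1
--         for j in range(i, n):
--             running = running * nums[j] % k
--             result[running] += 1
--     return result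
-- ===== Notes on version B (the rewrite author's own statement) =====
-- stated objective: simpler
-- what changed: Replaced the remainder->count defaultdict DP (propagating a map of products of subarrays ending at each index) by a plain double loop over start indices that extends a running product mod k and bumps the result bucket directly.
import Mathlib
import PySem

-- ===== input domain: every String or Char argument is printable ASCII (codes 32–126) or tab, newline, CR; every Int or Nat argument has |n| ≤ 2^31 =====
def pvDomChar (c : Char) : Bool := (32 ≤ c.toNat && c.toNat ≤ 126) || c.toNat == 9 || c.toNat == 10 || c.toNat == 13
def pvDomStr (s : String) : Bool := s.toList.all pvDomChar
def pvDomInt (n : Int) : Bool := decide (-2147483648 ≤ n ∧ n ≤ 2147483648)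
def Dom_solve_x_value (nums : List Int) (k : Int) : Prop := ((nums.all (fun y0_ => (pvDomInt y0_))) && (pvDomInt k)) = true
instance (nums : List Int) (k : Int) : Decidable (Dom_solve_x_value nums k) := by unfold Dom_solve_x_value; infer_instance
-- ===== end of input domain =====

-- B replaces A's remainder→count defaultdict DP by a plain double loop over start indices
-- extending a running product mod k; equal return values on Pre_ (A raises for nonempty nums with k ≤ 0).

-- ===== PORT A =====
-- the pass-through dict lurminexod = {'nums': list(nums), 'k': k} is heterogeneous; it is ported
-- as the two let-bindings it amounts to (nums_proc / k_proc are read straight back out of it)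
def solve_x_value (nums : List Int) (k : Int) : List Int :=
  let n := nums.length
  if n = 0 then List.replicate k.toNat 0
  else
    let nums_proc := nums
    let k_proc := k
    let n_proc := nums_proc.length
    let total_result := List.replicate k_proc.toNat (0 : Int)
    let current_dp : PySem.Dict Int Int := PySem.Dict.empty
    let st := (PySem.List.pyRange 0 (n_proc : Int)).foldl
      (fun (st : List Int × PySem.Dict Int Int) i =>
        let num_mod_k := PySem.Int.mod (PySem.List.pyGetD nums_proc i 0) k_proc
        let next_dp := (PySem.Dict.empty : PySem.Dict Int Int).modify num_mod_k 0 (· + 1)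
        let next_dp := st.2.items.foldl
          (fun nd p => nd.modify (PySem.Int.mod (p.1 * num_mod_k) k_proc) 0 (· + p.2)) next_dp
        let total_result := next_dp.items.foldl
          (fun tr p => PySem.List.pySetD tr p.1 (PySem.List.pyGetD tr p.1 0 + p.2)) st.1
        (total_result, next_dp))
      (total_result, current_dp)
    st.1

-- ===== PORT B =====
def solve_x_value_alt (nums : List Int) (k : Int) : List Int :=
  let n := nums.length
  if n = 0 then List.replicate k.toNat 0
  else
    (PySem.List.pyRange 0 (n : Int)).foldl
      (fun result i =>
        ((PySem.List.pyRange i (n : Int)).foldl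
          (fun (st : List Int × Int) j =>
            let running := PySem.Int.mod (st.2 * PySem.List.pyGetD nums j 0) k
            (PySem.List.pySetD st.1 running (PySem.List.pyGetD st.1 running 0 + 1), running))
          (result, 1)).1)
      (List.replicate k.toNat (0 : Int))

-- ===== PRECONDITION & SPEC =====
-- For nonempty nums with k ≤ 0 the Python A raises (ZeroDivisionError at `% k` for k = 0,
-- IndexError at `total_result[rem]` for k < 0, since total_result is then []); Pre_ excludes exactly those inputs.
def Pre_solve_x_value (nums : List Int) (k : Int) : Prop := nums = [] ∨ 1 ≤ k
instance (nums : List Int) (k : Int) : Decidable (Pre_solve_x_value nums k) := by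
  unfold Pre_solve_x_value; infer_instance
def pvWitness_solve_x_value : List Int × Int := ([2, 3], 3)

def Spec_solve_x_value (nums : List Int) (k : Int) (out : List Int) : Prop := out = solve_x_value_alt nums k
instance (nums : List Int) (k : Int) (out : List Int) : Decidable (Spec_solve_x_value nums k out) := by
  unfold Spec_solve_x_value; infer_instance

-- ===== CLAIM (what is proved, stated in full; the proofs are below) =====
def Claim_equal_solve_x_value : Prop := ∀ (nums : List Int) (k : Int), Dom_solve_x_value nums k → Pre_solve_x_value nums k → Spec_solve_x_value nums k (solve_x_value nums k)

-- ===== LEMMAS AND PROOFS =====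

-- remainders of the running products of B's inner loop started with accumulator c
def rowRems (k : Int) : Int → List Int → List Int
  | _, [] => []
  | c, x :: xs => (c * x) % k :: rowRems k ((c * x) % k) xs

-- remainders recorded by A's loop: E is the multiset of remainders of subarrays ending at the
-- previous element; each step emits the remainders ending at the current element
def allRems (k : Int) : List Int → List Int → List Int
  | _, [] => []
  | E, x :: xs =>
    let E' := x % k :: E.map (fun p => (p * (x % k)) % k)
    E' ++ allRems k E' xs

-- the multiset B records: one row of running remainders per start position
def ball (k : Int) : List Int → List Int
  | [] => []
  | x :: xs => rowRems k 1 (x :: xs) ++ ball k xs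

theorem mulmod (k a b : Int) : (a * (b % k)) % k = (a * b) % k := by
  conv_rhs => rw [Int.mul_emod]
  rw [Int.mul_emod, Int.emod_emod_of_dvd _ dvd_rfl]

theorem getD_set_eq (l : List Int) (n : Nat) (v : Int) (h : n < l.length) :
    (l.set n v).getD n 0 = v := by
  rw [List.getD_eq_getElem _ 0 (by simpa using h)]
  simp

theorem getD_set_ne (l : List Int) (n m : Nat) (v : Int) (h : m < l.length) (hne : n ≠ m) :
    (l.set n v).getD m 0 = l.getD m 0 := by
  rw [List.getD_eq_getElem _ 0 (by simpa using h), List.getElem_set_ne hne, List.getD_eq_getElem l 0 h]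

theorem sum_map_single (c : Int → Int) (x : Int) :
    ∀ (ks : List Int), ks.Nodup → x ∈ ks →
      (ks.map (fun p => if p = x then c p else 0)).sum = c x := by
  intro ks
  induction ks with
  | nil => intro _ h; cases h
  | cons a t ih =>
    intro hnd hmem
    rcases List.mem_cons.mp hmem with h | h
    · subst h
      have hz : (t.map (fun p => if p = x then c p else 0)) = t.map (fun _ => (0 : Int)) := by
        apply List.map_congr_left
        intro p hp
        have : p ≠ x := fun he => ((List.nodup_cons.mp hnd).1 (he ▸ hp))
        simp [this]
      simp [hz]
    · have hax : a ≠ x := fun he => ((List.nodup_cons.mp hnd).1 (he ▸ h))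
      simp only [List.map_cons, List.sum_cons, if_neg hax, zero_add]
      exact ih (List.nodup_cons.mp hnd).2 h

theorem sum_count_map (g : Int → Int) (r : Int) (ks : List Int) (hnd : ks.Nodup) :
    ∀ (L : List Int), (∀ p ∈ L, p ∈ ks) →
      (ks.map (fun p => if g p = r then (L.count p : Int) else 0)).sum = ((L.map g).count r : Int) := by
  intro L
  induction L with
  | nil => intro _; simp
  | cons x t ih =>
    intro hsub
    have hsplit : (ks.map (fun p => if g p = r then (((x :: t).count p : Nat) : Int) else 0))
        = ks.map (fun p => (if g p = r then (t.count p : Int) else 0)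
            + (if p = x then (if g p = r then 1 else 0) else 0)) := by
      apply List.map_congr_left
      intro p _
      by_cases h1 : g p = r
      · by_cases h2 : p = x
        · subst h2
          simp [h1, List.count_cons_self]
        · simp [h1, h2, List.count_cons]
          exact fun he => h2 he.symm
      · simp [h1]
    rw [hsplit, PySem.List.sum_map_add_int,
        ih (fun p hp => hsub p (List.mem_cons_of_mem _ hp)),
        sum_map_single (fun p => if g p = r then 1 else 0) x ks hnd (hsub x List.mem_cons_self)]
    rw [List.map_cons, List.count_cons]
    by_cases h : g x = r
    · simp [h]
    · have h' : ¬ r = g x := fun he => h he.symm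
      simp [h, h']

theorem dict_add_fold (k0 : Int) (key : Int × Int → Int) :
    ∀ (l : List (Int × Int)) (d0 : PySem.Dict Int Int) (r : Int),
      (l.foldl (fun nd p => nd.modify (key p) 0 (· + p.2)) d0).getD r 0
        = d0.getD r 0 + (l.map (fun p => if key p = r then p.2 else 0)).sum := by
  intro l
  induction l with
  | nil => intro d0 r; simp
  | cons p t ih =>
    intro d0 r
    simp only [List.foldl_cons, List.map_cons, List.sum_cons, ih]
    rw [PySem.Dict.getD_modify]
    by_cases h : r = key p
    · simp [h, eq_comm]; ring
    · have : ¬ key p = r := fun he => h he.symm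
      simp [h, this]

theorem tr_add_fold (k : Int) (hk : 0 < k) :
    ∀ (l : List (Int × Int)) (tr : List Int),
      (∀ p ∈ l, 0 ≤ p.1 ∧ p.1 < k) → tr.length = k.toNat →
      ((l.foldl (fun tr p => PySem.List.pySetD tr p.1 (PySem.List.pyGetD tr p.1 0 + p.2)) tr).length = k.toNat
      ∧ ∀ m : Int, 0 ≤ m → m < k →
        (l.foldl (fun tr p => PySem.List.pySetD tr p.1 (PySem.List.pyGetD tr p.1 0 + p.2)) tr).getD m.toNat 0
          = tr.getD m.toNat 0 + (l.map (fun p => if p.1 = m then p.2 else 0)).sum) := by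
  intro l
  induction l with
  | nil => intro tr _ hlen; exact ⟨hlen, fun m _ _ => by simp⟩
  | cons p t ih =>
    intro tr hb hlen
    have hp := hb p List.mem_cons_self
    have hlt : p.1 < (tr.length : Int) := by rw [hlen]; omega
    have hget : PySem.List.pyGetD tr p.1 0 = tr.getD p.1.toNat 0 := by
      rw [PySem.List.pyGetD_eq_getElem tr 0 hp.1 hlt, List.getD_eq_getElem tr 0 (by omega)]
    have hset : PySem.List.pySetD tr p.1 (PySem.List.pyGetD tr p.1 0 + p.2)
        = tr.set p.1.toNat (tr.getD p.1.toNat 0 + p.2) := by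
      rw [PySem.List.pySetD_of_nonneg tr _ hp.1, hget]
    have hlen' : (tr.set p.1.toNat (tr.getD p.1.toNat 0 + p.2)).length = k.toNat := by
      simp [hlen]
    obtain ⟨ihlen, ihget⟩ := ih (tr.set p.1.toNat (tr.getD p.1.toNat 0 + p.2))
      (fun q hq => hb q (List.mem_cons_of_mem _ hq)) hlen'
    constructor
    · simpa [hset] using ihlen
    · intro m hm0 hmk
      have hmlen : m.toNat < tr.length := by omega
      simp only [List.foldl_cons, hset, List.map_cons, List.sum_cons]
      rw [ihget m hm0 hmk]
      by_cases h : p.1 = m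
      · have hidx : m.toNat = p.1.toNat := by omega
        rw [hidx, getD_set_eq _ _ _ (by omega)]
        simp [h]
        ring
      · have hidx : p.1.toNat ≠ m.toNat := by omega
        rw [getD_set_ne _ _ _ _ hmlen hidx]
        simp [h]

-- B's inner loop bumps exactly the buckets rowRems k c l
theorem B_inner (k : Int) (hk : 0 < k) :
    ∀ (l : List Int) (tr : List Int) (c : Int), tr.length = k.toNat →
      ((l.foldl (fun (st : List Int × Int) x =>
          (PySem.List.pySetD st.1 (PySem.Int.mod (st.2 * x) k)
            (PySem.List.pyGetD st.1 (PySem.Int.mod (st.2 * x) k) 0 + 1), PySem.Int.mod (st.2 * x) k))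
        (tr, c)).1.length = k.toNat)
      ∧ ∀ m : Int, 0 ≤ m → m < k →
        ((l.foldl (fun (st : List Int × Int) x =>
          (PySem.List.pySetD st.1 (PySem.Int.mod (st.2 * x) k)
            (PySem.List.pyGetD st.1 (PySem.Int.mod (st.2 * x) k) 0 + 1), PySem.Int.mod (st.2 * x) k))
        (tr, c)).1.getD m.toNat 0 = tr.getD m.toNat 0 + ((rowRems k c l).count m : Int)) := by
  intro l
  induction l with
  | nil => intro tr c hlen; exact ⟨hlen, fun m _ _ => by simp [rowRems]⟩
  | cons x t ih =>
    intro tr c hlen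
    have hr0 : (0 : Int) ≤ (c * x) % k := Int.emod_nonneg _ (by omega)
    have hrk : (c * x) % k < k := Int.emod_lt_of_pos _ hk
    have hrlt : (c * x) % k < (tr.length : Int) := by rw [hlen]; omega
    have hget : PySem.List.pyGetD tr ((c * x) % k) 0 = tr.getD ((c * x) % k).toNat 0 := by
      rw [PySem.List.pyGetD_eq_getElem tr 0 hr0 hrlt, List.getD_eq_getElem tr 0 (by omega)]
    have hstep : (fun (st : List Int × Int) x =>
          (PySem.List.pySetD st.1 (PySem.Int.mod (st.2 * x) k)
            (PySem.List.pyGetD st.1 (PySem.Int.mod (st.2 * x) k) 0 + 1), PySem.Int.mod (st.2 * x) k)) (tr, c) x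
        = (tr.set ((c * x) % k).toNat (tr.getD ((c * x) % k).toNat 0 + 1), (c * x) % k) := by
      simp only [PySem.Int.mod_eq_emod_of_pos hk]
      rw [PySem.List.pySetD_of_nonneg tr _ hr0, hget]
    have hlen' : (tr.set ((c * x) % k).toNat (tr.getD ((c * x) % k).toNat 0 + 1)).length = k.toNat := by
      simp [hlen]
    obtain ⟨ihlen, ihget⟩ := ih (tr.set ((c * x) % k).toNat (tr.getD ((c * x) % k).toNat 0 + 1))
      ((c * x) % k) hlen'
    constructor
    · simpa only [List.foldl_cons, hstep] using ihlen
    · intro m hm0 hmk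
      have hmlen : m.toNat < tr.length := by omega
      simp only [List.foldl_cons, hstep]
      rw [ihget m hm0 hmk]
      simp only [rowRems, List.count_cons]
      by_cases h : (c * x) % k = m
      · have hidx : m.toNat = ((c * x) % k).toNat := by omega
        rw [hidx, getD_set_eq _ _ _ (by omega)]
        have h' : (m = (c * x) % k) := h.symm
        simp [h']
        push_cast
        ring
      · have hidx : ((c * x) % k).toNat ≠ m.toNat := by omega
        rw [getD_set_ne _ _ _ _ hmlen hidx]
        simp [h]

-- A's loop invariant: the dict carries the bucket counts of E, the result list accumulates allRems
theorem A_loop (k : Int) (hk : 0 < k) :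
    ∀ (l : List Int) (tr : List Int) (dp : PySem.Dict Int Int) (E : List Int),
      (∀ r, dp.getD r 0 = (E.count r : Int)) →
      dp.keys.Nodup →
      (∀ r ∈ dp.keys, 0 ≤ r ∧ r < k) →
      (∀ r ∈ E, r ∈ dp.keys) →
      tr.length = k.toNat →
      ((l.foldl (fun (st : List Int × PySem.Dict Int Int) x =>
          ((st.2.items.foldl
              (fun nd p => nd.modify (PySem.Int.mod (p.1 * PySem.Int.mod x k) k) 0 (· + p.2))
              ((PySem.Dict.empty : PySem.Dict Int Int).modify (PySem.Int.mod x k) 0 (· + 1))).items.foldl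
            (fun tr p => PySem.List.pySetD tr p.1 (PySem.List.pyGetD tr p.1 0 + p.2)) st.1,
           st.2.items.foldl
              (fun nd p => nd.modify (PySem.Int.mod (p.1 * PySem.Int.mod x k) k) 0 (· + p.2))
              ((PySem.Dict.empty : PySem.Dict Int Int).modify (PySem.Int.mod x k) 0 (· + 1)))) (tr, dp)).1.length = k.toNat)
      ∧ ∀ m : Int, 0 ≤ m → m < k →
        ((l.foldl (fun (st : List Int × PySem.Dict Int Int) x =>
          ((st.2.items.foldl
              (fun nd p => nd.modify (PySem.Int.mod (p.1 * PySem.Int.mod x k) k) 0 (· + p.2))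
              ((PySem.Dict.empty : PySem.Dict Int Int).modify (PySem.Int.mod x k) 0 (· + 1))).items.foldl
            (fun tr p => PySem.List.pySetD tr p.1 (PySem.List.pyGetD tr p.1 0 + p.2)) st.1,
           st.2.items.foldl
              (fun nd p => nd.modify (PySem.Int.mod (p.1 * PySem.Int.mod x k) k) 0 (· + p.2))
              ((PySem.Dict.empty : PySem.Dict Int Int).modify (PySem.Int.mod x k) 0 (· + 1)))) (tr, dp)).1.getD m.toNat 0
          = tr.getD m.toNat 0 + ((allRems k E l).count m : Int)) := by
  intro l
  induction l with
  | nil =>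
    intro tr dp E _ _ _ _ hlen
    exact ⟨hlen, fun m _ _ => by simp [allRems]⟩
  | cons x t ih =>
    intro tr dp E hdp hnd hkeys hE hlen
    have hkne : k ≠ 0 := by omega
    have hstep : (fun (st : List Int × PySem.Dict Int Int) x =>
          ((st.2.items.foldl
              (fun nd p => nd.modify (PySem.Int.mod (p.1 * PySem.Int.mod x k) k) 0 (· + p.2))
              ((PySem.Dict.empty : PySem.Dict Int Int).modify (PySem.Int.mod x k) 0 (· + 1))).items.foldl
            (fun tr p => PySem.List.pySetD tr p.1 (PySem.List.pyGetD tr p.1 0 + p.2)) st.1,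
           st.2.items.foldl
              (fun nd p => nd.modify (PySem.Int.mod (p.1 * PySem.Int.mod x k) k) 0 (· + p.2))
              ((PySem.Dict.empty : PySem.Dict Int Int).modify (PySem.Int.mod x k) 0 (· + 1)))) (tr, dp) x
        = (((dp.items.foldl
              (fun nd p => nd.modify ((p.1 * (x % k)) % k) 0 (· + p.2))
              ((PySem.Dict.empty : PySem.Dict Int Int).modify (x % k) 0 (· + 1))).items.foldl
              (fun tr p => PySem.List.pySetD tr p.1 (PySem.List.pyGetD tr p.1 0 + p.2)) tr),
           (dp.items.foldl
              (fun nd p => nd.modify ((p.1 * (x % k)) % k) 0 (· + p.2))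
              ((PySem.Dict.empty : PySem.Dict Int Int).modify (x % k) 0 (· + 1)))) := by
      simp only [PySem.Int.mod_eq_emod_of_pos hk]
    set nd0 : PySem.Dict Int Int :=
      (PySem.Dict.empty : PySem.Dict Int Int).modify (x % k) 0 (· + 1) with hnd0
    set nd : PySem.Dict Int Int :=
      dp.items.foldl (fun nd p => nd.modify ((p.1 * (x % k)) % k) 0 (· + p.2)) nd0 with hnddef
    set tr' : List Int :=
      nd.items.foldl (fun tr p => PySem.List.pySetD tr p.1 (PySem.List.pyGetD tr p.1 0 + p.2)) tr
      with htr'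
    -- the bucket counts held by nd are exactly the counts of E'
    have hnd0get : ∀ r : Int, nd0.getD r 0 = if r = x % k then 1 else 0 := by
      intro r
      rw [hnd0, PySem.Dict.getD_modify]
      simp
    have hndget : ∀ r : Int,
        nd.getD r 0 = (((x % k :: E.map (fun p => (p * (x % k)) % k)).count r : Nat) : Int) := by
      intro r
      rw [hnddef, dict_add_fold k (fun p => (p.1 * (x % k)) % k) dp.items nd0 r,
          PySem.Dict.items_eq_map_keys dp hnd 0, List.map_map]
      have hcmp : (dp.keys.map ((fun p : Int × Int => if (p.1 * (x % k)) % k = r then p.2 else 0)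
            ∘ (fun q => (q, dp.getD q 0))))
          = dp.keys.map (fun q => if (q * (x % k)) % k = r then (E.count q : Int) else 0) := by
        apply List.map_congr_left
        intro q _
        simp [Function.comp, hdp q]
      rw [hcmp, sum_count_map (fun q => (q * (x % k)) % k) r dp.keys hnd E hE, hnd0get r,
          List.count_cons]
      push_cast
      by_cases hr : r = x % k
      · simp [hr]
        ring
      · have hr' : ¬ (x % k = r) := fun he => hr he.symm
        simp [hr, hr']
    have hnd0keys : nd0.keys = [x % k] := rfl
    have hndkeys : nd.keys = PySem.Set.update [x % k]
        (dp.items.map (fun p => (p.1 * (x % k)) % k)) := by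
      rw [hnddef, PySem.Dict.keys_foldl_modify_key dp.items
        (fun p => (p.1 * (x % k)) % k) 0 (fun _ p => (· + p.2)) nd0, hnd0keys]
    have hndnodup : nd.keys.Nodup := by
      rw [hnddef]
      exact PySem.Dict.nodup_keys_foldl_modify_key dp.items _ 0 (fun _ p => (· + p.2)) nd0
        (by rw [hnd0keys]; simp)
    have hndbounds : ∀ r ∈ nd.keys, 0 ≤ r ∧ r < k := by
      intro r hr
      rw [hndkeys] at hr
      rcases (PySem.Set.mem_update _ _ _).mp hr with h | h
      · simp at h
        exact h ▸ ⟨Int.emod_nonneg _ hkne, Int.emod_lt_of_pos _ hk⟩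
      · obtain ⟨p, _, hp⟩ := List.mem_map.mp h
        exact hp ▸ ⟨Int.emod_nonneg _ hkne, Int.emod_lt_of_pos _ hk⟩
    have hE' : ∀ r ∈ (x % k :: E.map (fun p => (p * (x % k)) % k)), r ∈ nd.keys := by
      intro r hr
      rw [hndkeys]
      rcases List.mem_cons.mp hr with h | h
      · exact (PySem.Set.mem_update _ _ _).mpr (Or.inl (by simp [h]))
      · refine (PySem.Set.mem_update _ _ _).mpr (Or.inr ?_)
        obtain ⟨q, hq, hqr⟩ := List.mem_map.mp h
        have hqk := hE q hq
        have : q ∈ dp.items.map Prod.fst := by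
          simpa only [PySem.Dict.keys] using hqk
        obtain ⟨p, hp, hpq⟩ := List.mem_map.mp this
        exact List.mem_map.mpr ⟨p, hp, by rw [hpq, hqr]⟩
    have hitemsbounds : ∀ p ∈ nd.items, 0 ≤ p.1 ∧ p.1 < k := by
      intro p hp
      exact hndbounds p.1 (PySem.Dict.mem_keys_of_mem_items nd hp)
    obtain ⟨htrlen, htrget⟩ := tr_add_fold k hk nd.items tr hitemsbounds hlen
    have htrget' : ∀ m : Int, 0 ≤ m → m < k →
        tr'.getD m.toNat 0 = tr.getD m.toNat 0
          + (((x % k :: E.map (fun p => (p * (x % k)) % k)).count m : Nat) : Int) := by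
      intro m hm0 hmk
      rw [htr', htrget m hm0 hmk, PySem.Dict.items_eq_map_keys nd hndnodup 0, List.map_map]
      have hcmp : (nd.keys.map ((fun p : Int × Int => if p.1 = m then p.2 else 0)
            ∘ (fun q => (q, nd.getD q 0))))
          = nd.keys.map (fun q => if q = m then nd.getD q 0 else 0) := by
        apply List.map_congr_left
        intro q _
        simp [Function.comp]
      rw [hcmp, ← hndget m]
      by_cases hmem : m ∈ nd.keys
      · rw [sum_map_single (fun q => nd.getD q 0) m nd.keys hndnodup hmem]
      · have hz : nd.keys.map (fun q => if q = m then nd.getD q 0 else 0)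
            = nd.keys.map (fun _ => (0 : Int)) := by
          apply List.map_congr_left
          intro q hq
          have : q ≠ m := fun he => hmem (he ▸ hq)
          simp [this]
        have hc : nd.contains m = false := by
          rcases Bool.eq_false_or_eq_true (nd.contains m) with h | h
          · exact absurd ((PySem.Dict.contains_iff_mem_keys nd m).mp h) hmem
          · exact h
        rw [hz, PySem.Dict.getD_of_not_contains nd 0 hc]
        simp
    obtain ⟨ihlen, ihget⟩ := ih tr' nd (x % k :: E.map (fun p => (p * (x % k)) % k))
      hndget hndnodup hndbounds hE' htrlen
    constructor
    · simpa only [List.foldl_cons, hstep] using ihlen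
    · intro m hm0 hmk
      simp only [List.foldl_cons, hstep]
      rw [ihget m hm0 hmk, htrget' m hm0 hmk]
      have : allRems k E (x :: t)
          = (x % k :: E.map (fun p => (p * (x % k)) % k))
            ++ allRems k (x % k :: E.map (fun p => (p * (x % k)) % k)) t := by
        simp [allRems]
      rw [this, List.count_append]
      push_cast
      ring

-- count bookkeeping: appending a fresh initial bucket list E to A's recursion
theorem count_flatMap_cons (m : Int) (f : Int → Int) (h : Int → List Int) :
    ∀ E : List Int,
      (E.flatMap (fun p => f p :: h p)).count m = (E.map f).count m + (E.flatMap h).count m := by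
  intro E
  induction E with
  | nil => simp
  | cons q t ih =>
    simp only [List.flatMap_cons, List.map_cons, List.count_append, List.count_cons, ih]
    omega

theorem allRems_count (k : Int) (m : Int) :
    ∀ (l E : List Int),
      (allRems k E l).count m
        = (E.flatMap (fun p => rowRems k p l)).count m + (allRems k [] l).count m := by
  intro l
  induction l with
  | nil =>
    intro E
    have h1 : allRems k E [] = [] := rfl
    have h2 : E.flatMap (fun p => rowRems k p []) = E.flatMap (fun _ => ([] : List Int)) :=
      List.flatMap_congr (fun x _ => rfl)
    have h3 : E.flatMap (fun _ => ([] : List Int)) = [] := by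
      induction E with
      | nil => rfl
      | cons a t iht => simpa using iht
    rw [h1, h2, h3]
    rfl
  | cons x t ih =>
    intro E
    have hg : (fun p => (p * (x % k)) % k) = fun p => (p * x) % k :=
      funext fun p => mulmod k p x
    have hrow : (fun p => rowRems k p (x :: t))
        = fun p => (p * x) % k :: rowRems k ((p * x) % k) t := by
      funext p
      simp [rowRems]
    have hunf : allRems k E (x :: t)
        = (x % k :: E.map (fun p => (p * x) % k))
          ++ allRems k (x % k :: E.map (fun p => (p * x) % k)) t := by
      simp [allRems, hg]
    have hunf0 : allRems k [] (x :: t) = [x % k] ++ allRems k [x % k] t := by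
      simp [allRems]
    rw [hunf, hunf0, List.count_append, List.count_append,
        ih (x % k :: E.map (fun p => (p * x) % k)), ih [x % k], hrow,
        count_flatMap_cons m (fun p => (p * x) % k) (fun p => rowRems k ((p * x) % k) t) E]
    simp only [List.flatMap_cons, List.flatMap_nil, List.append_nil, List.count_append,
        List.count_cons, List.count_nil, List.flatMap_map]
    omega

theorem allRems_eq_ball_count (k : Int) (m : Int) :
    ∀ (l : List Int), (allRems k [] l).count m = (ball k l).count m := by
  intro l
  induction l with
  | nil => simp [allRems, ball]
  | cons x t ih =>
    have hunf0 : allRems k [] (x :: t) = [x % k] ++ allRems k [x % k] t := by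
      simp [allRems]
    have hball : ball k (x :: t) = ((1 * x) % k :: rowRems k ((1 * x) % k) t) ++ ball k t := by
      simp [ball, rowRems]
    rw [hunf0, hball, List.count_append, List.count_append, allRems_count k m t [x % k], ← ih]
    simp only [List.flatMap_cons, List.flatMap_nil, List.append_nil,
        List.count_cons, List.count_nil, one_mul]
    omega

-- B's outer loop from start index a accumulates the buckets of ball (nums.drop a)
theorem B_outer (k : Int) (hk : 0 < k) (nums : List Int) :
    ∀ (d a : Nat) (tr : List Int), nums.length - a = d → tr.length = k.toNat →
      (((PySem.List.pyRange (a : Int) (nums.length : Int)).foldl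
          (fun result i => (((nums.drop i.toNat).foldl
            (fun (st : List Int × Int) x =>
              (PySem.List.pySetD st.1 (PySem.Int.mod (st.2 * x) k)
                (PySem.List.pyGetD st.1 (PySem.Int.mod (st.2 * x) k) 0 + 1), PySem.Int.mod (st.2 * x) k))
            (result, 1)).1)) tr).length = k.toNat)
      ∧ ∀ m : Int, 0 ≤ m → m < k →
        ((PySem.List.pyRange (a : Int) (nums.length : Int)).foldl
          (fun result i => (((nums.drop i.toNat).foldl
            (fun (st : List Int × Int) x =>
              (PySem.List.pySetD st.1 (PySem.Int.mod (st.2 * x) k)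
                (PySem.List.pyGetD st.1 (PySem.Int.mod (st.2 * x) k) 0 + 1), PySem.Int.mod (st.2 * x) k))
            (result, 1)).1)) tr).getD m.toNat 0
          = tr.getD m.toNat 0 + ((ball k (nums.drop a)).count m : Int) := by
  intro d
  induction d with
  | zero =>
    intro a tr hd hlen
    have ha : nums.length ≤ a := by omega
    have hnil : PySem.List.pyRange (a : Int) (nums.length : Int) = [] :=
      PySem.List.pyRange_one_eq_nil (by exact_mod_cast ha)
    have hdrop : nums.drop a = [] := List.drop_of_length_le ha
    rw [hnil, hdrop]
    exact ⟨hlen, fun m _ _ => by simp [ball]⟩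
  | succ d ihd =>
    intro a tr hd hlen
    have ha : a < nums.length := by omega
    have hcons : PySem.List.pyRange (a : Int) (nums.length : Int)
        = (a : Int) :: PySem.List.pyRange ((a : Int) + 1) (nums.length : Int) :=
      PySem.List.pyRange_one_cons (by exact_mod_cast ha)
    obtain ⟨h1len, h1get⟩ := B_inner k hk (nums.drop a) tr 1 hlen
    have hcast : ((a : Int) + 1) = ((a + 1 : Nat) : Int) := by push_cast; ring
    obtain ⟨ihlen, ihget⟩ := ihd (a + 1)
      (((nums.drop ((a : Int).toNat)).foldl
        (fun (st : List Int × Int) x =>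
          (PySem.List.pySetD st.1 (PySem.Int.mod (st.2 * x) k)
            (PySem.List.pyGetD st.1 (PySem.Int.mod (st.2 * x) k) 0 + 1), PySem.Int.mod (st.2 * x) k))
        (tr, 1)).1) (by omega) (by simpa using h1len)
    have hdropcons : nums.drop a = nums[a] :: nums.drop (a + 1) :=
      List.drop_eq_getElem_cons ha
    constructor
    · rw [hcons, List.foldl_cons, ← hcast] at *
      exact ihlen
    · intro m hm0 hmk
      rw [hcons, List.foldl_cons, ← hcast] at *
      rw [ihget m hm0 hmk]
      have := h1get m hm0 hmk
      simp only [Int.toNat_natCast] at this ⊢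
      rw [this]
      have hball : ball k (nums.drop a)
          = rowRems k 1 (nums.drop a) ++ ball k (nums.drop (a + 1)) := by
        rw [hdropcons]
        simp [ball]
      rw [hball, List.count_append]
      push_cast
      ring

theorem solve_x_value_spec : Claim_equal_solve_x_value := by
  unfold Claim_equal_solve_x_value
  intro nums k _ hpre
  unfold Spec_solve_x_value
  by_cases hnil : nums = []
  · subst hnil
    simp [solve_x_value, solve_x_value_alt]
  · have hk : 0 < k := by
      rcases hpre with h | h
      · exact absurd h hnil
      · omega
    have hn : ¬ nums.length = 0 := fun h => hnil (List.length_eq_zero_iff.mp h)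
    rw [solve_x_value, solve_x_value_alt]
    simp only [hn, if_false]
    -- A side: the index loop only reads nums[i], so it is the fold over nums itself
    rw [PySem.List.foldl_pyRange_pyGetD' nums 0
      (fun (st : List Int × PySem.Dict Int Int) x =>
        ((st.2.items.foldl
            (fun nd p => nd.modify (PySem.Int.mod (p.1 * PySem.Int.mod x k) k) 0 (· + p.2))
            ((PySem.Dict.empty : PySem.Dict Int Int).modify (PySem.Int.mod x k) 0 (· + 1))).items.foldl
          (fun tr p => PySem.List.pySetD tr p.1 (PySem.List.pyGetD tr p.1 0 + p.2)) st.1,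
         st.2.items.foldl
            (fun nd p => nd.modify (PySem.Int.mod (p.1 * PySem.Int.mod x k) k) 0 (· + p.2))
            ((PySem.Dict.empty : PySem.Dict Int Int).modify (PySem.Int.mod x k) 0 (· + 1))))
      (List.replicate k.toNat (0 : Int), (PySem.Dict.empty : PySem.Dict Int Int)) (le_refl 0)]
    simp only [Int.toNat_zero, List.drop_zero]
    obtain ⟨halen, haget⟩ := A_loop k hk nums (List.replicate k.toNat 0) PySem.Dict.empty []
      (fun r => by simp) (by rw [PySem.Dict.keys_empty]; exact List.nodup_nil)
      (by simp [PySem.Dict.keys_empty]) (by simp) (by simp)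
    -- B side: each inner loop reads only nums[j], so it folds over nums.drop i
    have hbody : ∀ (result : List Int) (i : Int), i ∈ PySem.List.pyRange 0 (nums.length : Int) →
        ((PySem.List.pyRange i (nums.length : Int)).foldl
          (fun (st : List Int × Int) j =>
            (PySem.List.pySetD st.1 (PySem.Int.mod (st.2 * PySem.List.pyGetD nums j 0) k)
              (PySem.List.pyGetD st.1 (PySem.Int.mod (st.2 * PySem.List.pyGetD nums j 0) k) 0 + 1),
             PySem.Int.mod (st.2 * PySem.List.pyGetD nums j 0) k))
          (result, 1)).1
        = ((nums.drop i.toNat).foldl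
          (fun (st : List Int × Int) x =>
            (PySem.List.pySetD st.1 (PySem.Int.mod (st.2 * x) k)
              (PySem.List.pyGetD st.1 (PySem.Int.mod (st.2 * x) k) 0 + 1), PySem.Int.mod (st.2 * x) k))
          (result, 1)).1 := by
      intro result i hi
      have hi0 : 0 ≤ i := (PySem.List.mem_pyRange_one.mp hi).1
      rw [PySem.List.foldl_pyRange_pyGetD' nums 0
        (fun (st : List Int × Int) x =>
          (PySem.List.pySetD st.1 (PySem.Int.mod (st.2 * x) k)
            (PySem.List.pyGetD st.1 (PySem.Int.mod (st.2 * x) k) 0 + 1), PySem.Int.mod (st.2 * x) k))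
        (result, 1) hi0]
    rw [PySem.List.foldl_congr_mem (PySem.List.pyRange 0 (nums.length : Int)) _ _
      (List.replicate k.toNat (0 : Int)) hbody]
    obtain ⟨hblen, hbget⟩ := B_outer k hk nums nums.length 0
      (List.replicate k.toNat 0) (by omega) (by simp)
    simp only [Nat.cast_zero, List.drop_zero] at hblen hbget
    apply List.ext_getElem (by rw [halen, hblen])
    intro j hja hjb
    have hjk : j < k.toNat := by rw [← halen]; exact hja
    have hj0 : (0 : Int) ≤ (j : Int) := by omega
    have hjlt : (j : Int) < k := by omega
    have hA := haget (j : Int) hj0 hjlt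
    have hB := hbget (j : Int) hj0 hjlt
    simp only [Int.toNat_natCast] at hA hB
    rw [← List.getD_eq_getElem _ 0 hja, ← List.getD_eq_getElem _ 0 hjb, hA, hB,
        allRems_eq_ball_count k (j : Int) nums]
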